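-- pv_equiv track=rewrite | github.com/goldPig888/utd_cv | tests/rosbagExtractor.py | _get_camera_topics
-- ===== SOURCE A (Python) =====
-- def _get_camera_topics(topics):
--     cameras = {}
--     for topic in topics:
--         parts = topic.split('/')
--         if len(parts) > 2 and 'image_raw' in parts[-1]:
--             camera_id = parts[1]
--             if camera_id not in cameras:
--                 cameras[camera_id] = {}
--             if '/color/image_raw' in topic and 'aligned_depth_to_color' not in topic:
--                 cameras[camera_id]['color'] = topic
--             elif '/aligned_depth_to_color/image_raw' in topic:
--                 cameras[camera_id]['depth'] = topic
--     return cameras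
-- ===== SOURCE B (Python) =====
-- def _get_camera_topics(topics):
--     def _classify(topic):
--         parts = topic.split('/')
--         if len(parts) > 2 and 'image_raw' in parts[-1]:
--             if '/color/image_raw' in topic and 'aligned_depth_to_color' not in topic:
--                 return (parts[1], ('color', topic))
--             if '/aligned_depth_to_color/image_raw' in topic:
--                 return (parts[1], ('depth', topic))
--             return (parts[1], None)
--         return None
--
--     events = [e for e in map(_classify, topics) if e is not None]
--     ids = []
--     for cid, _ in events:
--         if cid not in ids:
--             ids.append(cid)
--
--     def _streams(cid):
--         d = {}
--         for c, kt in events: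
--             if c == cid and kt is not None:
--                 d[kt[0]] = kt[1]
--         return d
--
--     return {cid: _streams(cid) for cid in ids}
-- ===== Notes on version B (the rewrite author's own statement) =====
-- stated objective: alternative
-- what changed: A's single stateful pass mutating a dict-of-dicts is replaced by a classify-then-group-by decomposition: each topic is classified once into (camera_id, optional stream event), camera ids are deduplicated in first-occurrence order, and each camera's stream dict is rebuilt by a per-camera scan of the classified events.
import Mathlib
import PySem

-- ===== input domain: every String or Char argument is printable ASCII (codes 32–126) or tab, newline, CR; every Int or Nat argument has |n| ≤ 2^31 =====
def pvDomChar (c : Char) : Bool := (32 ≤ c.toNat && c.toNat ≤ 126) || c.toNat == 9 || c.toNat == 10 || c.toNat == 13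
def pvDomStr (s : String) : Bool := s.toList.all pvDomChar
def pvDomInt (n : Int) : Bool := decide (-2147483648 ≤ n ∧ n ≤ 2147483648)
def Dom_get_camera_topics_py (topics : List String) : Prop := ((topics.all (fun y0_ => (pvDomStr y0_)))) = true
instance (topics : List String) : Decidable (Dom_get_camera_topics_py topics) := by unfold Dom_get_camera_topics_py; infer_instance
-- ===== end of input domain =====

-- B replaces A's single stateful pass over a dict-of-dicts by a classify-then-group-by
-- decomposition (objective: alternative; same behaviour, no speed claim).

-- ===== PORT A =====
-- the body of A's 'for topic in topics' loop; 'if camera_id not in cameras: cameras[camera_id] = {}'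
-- is dict.setdefault, and 'cameras[camera_id][k] = topic' (key present) is Dict.modify.
-- topic.split('/') is Str.split? with the nonempty literal separator "/" (always some);
-- parts[1] / parts[-1] are read via pyGetD: under the guard len(parts) > 2 both are in range.
def pvStepA (cameras : PySem.Dict String (PySem.Dict String String)) (topic : String) :
    PySem.Dict String (PySem.Dict String String) :=
  let parts := (PySem.Str.split? topic "/").getD []
  if parts.length > 2 ∧ PySem.Str.isIn "image_raw" (PySem.List.pyGetD parts (-1) "") then
    let camera_id := PySem.List.pyGetD parts 1 ""
    let cameras := cameras.setdefault camera_id PySem.Dict.empty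
    if PySem.Str.isIn "/color/image_raw" topic ∧ ¬ PySem.Str.isIn "aligned_depth_to_color" topic then
      cameras.modify camera_id PySem.Dict.empty (fun s => s.insert "color" topic)
    else if PySem.Str.isIn "/aligned_depth_to_color/image_raw" topic then
      cameras.modify camera_id PySem.Dict.empty (fun s => s.insert "depth" topic)
    else cameras
  else cameras

def get_camera_topics_py (topics : List String) : List (String × List (String × String)) :=
  ((topics.foldl pvStepA PySem.Dict.empty).items).map (fun p => (p.1, p.2.items))

-- ===== PORT B =====
-- B's _classify: none = not an image_raw camera topic; otherwise (camera_id, optional (stream, topic)).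
def pvClassify (topic : String) : Option (String × Option (String × String)) :=
  let parts := (PySem.Str.split? topic "/").getD []
  if parts.length > 2 ∧ PySem.Str.isIn "image_raw" (PySem.List.pyGetD parts (-1) "") then
    if PySem.Str.isIn "/color/image_raw" topic ∧ ¬ PySem.Str.isIn "aligned_depth_to_color" topic then
      some (PySem.List.pyGetD parts 1 "", some ("color", topic))
    else if PySem.Str.isIn "/aligned_depth_to_color/image_raw" topic then
      some (PySem.List.pyGetD parts 1 "", some ("depth", topic))
    else some (PySem.List.pyGetD parts 1 "", none)
  else none

-- B's _streams(cid): 'if c == cid and kt is not None: d[kt[0]] = kt[1]' over the events.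
def pvStreams (events : List (String × Option (String × String))) (cid : String) :
    PySem.Dict String String :=
  events.foldl (fun d e =>
    if e.1 == cid then
      match e.2 with
      | some kt => d.insert kt.1 kt.2
      | none => d
    else d) PySem.Dict.empty

def get_camera_topics_py_alt (topics : List String) : List (String × List (String × String)) :=
  let events := topics.filterMap pvClassify
  -- B's 'ids' loop is ordered dedup = set-of-list in first-occurrence order
  let ids : PySem.Set String := PySem.Set.ofList (events.map (fun e => e.1))
  -- the outer dict comprehension {cid: _streams(cid) for cid in ids}
  (ids.foldl (fun d cid => d.insert cid (pvStreams events cid).items)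
    (PySem.Dict.empty : PySem.Dict String (List (String × String)))).items

-- ===== PRECONDITION & SPEC =====
def Spec_get_camera_topics_py (topics : List String) (out : List (String × List (String × String))) : Prop := out = get_camera_topics_py_alt topics
instance (topics : List String) (out : List (String × List (String × String))) : Decidable (Spec_get_camera_topics_py topics out) := by unfold Spec_get_camera_topics_py; infer_instance

-- ===== CLAIM (what is proved, stated in full; the proofs are below) =====
def Claim_equal_get_camera_topics_py : Prop := ∀ (topics : List String), Dom_get_camera_topics_py topics → Spec_get_camera_topics_py topics (get_camera_topics_py topics)

-- ===== LEMMAS AND PROOFS =====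

-- A's loop body expressed on a classified event
def pvStepE (d : PySem.Dict String (PySem.Dict String String))
    (e : String × Option (String × String)) : PySem.Dict String (PySem.Dict String String) :=
  let d1 := d.setdefault e.1 PySem.Dict.empty
  match e.2 with
  | some kt => d1.modify e.1 PySem.Dict.empty (fun s => s.insert kt.1 kt.2)
  | none => d1

-- the (stream, topic) pairs of the events belonging to camera c, in order
def pvGrp (es : List (String × Option (String × String))) (c : String) :
    List (String × String) :=
  (es.filter (fun e => e.1 == c)).filterMap (fun e => e.2)

def pvFill (d0 : PySem.Dict String String) (l : List (String × String)) :
    PySem.Dict String String :=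
  l.foldl (fun dd kt => dd.insert kt.1 kt.2) d0

theorem pvStepA_eq (d : PySem.Dict String (PySem.Dict String String)) (t : String) :
    pvStepA d t = match pvClassify t with
      | some e => pvStepE d e
      | none => d := by
  unfold pvStepA pvClassify pvStepE
  dsimp only
  split_ifs <;> rfl

theorem pvFoldA_eq (ts : List String) (d : PySem.Dict String (PySem.Dict String String)) :
    ts.foldl pvStepA d = (ts.filterMap pvClassify).foldl pvStepE d := by
  induction ts generalizing d with
  | nil => rfl
  | cons t ts ih =>
    simp only [List.foldl_cons, List.filterMap_cons, pvStepA_eq]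
    cases h : pvClassify t <;> simp [ih]

theorem pvStreams_go (es : List (String × Option (String × String))) (c : String)
    (d : PySem.Dict String String) :
    es.foldl (fun d e =>
      if e.1 == c then
        match e.2 with
        | some kt => d.insert kt.1 kt.2
        | none => d
      else d) d = pvFill d (pvGrp es c) := by
  induction es generalizing d with
  | nil => rfl
  | cons e es ih =>
    simp only [List.foldl_cons, pvGrp, List.filter_cons]
    cases h : (e.1 == c) <;> cases h2 : e.2 <;>
      simp_all [pvGrp, pvFill]

theorem pvStreams_eq (es : List (String × Option (String × String))) (c : String) :
    pvStreams es c = pvFill PySem.Dict.empty (pvGrp es c) := by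
  unfold pvStreams
  exact pvStreams_go es c _

theorem pvKeys_stepE (d : PySem.Dict String (PySem.Dict String String))
    (e : String × Option (String × String)) :
    (pvStepE d e).keys = PySem.Set.add d.keys e.1 := by
  unfold pvStepE
  by_cases hc : d.contains e.1 = true
  · have hmem : e.1 ∈ d.keys := (PySem.Dict.contains_iff_mem_keys d e.1).mp hc
    rw [PySem.Dict.setdefault_of_contains d _ hc]
    have hadd : PySem.Set.add d.keys e.1 = d.keys := by
      simp [PySem.Set.add, PySem.Set.contains, hmem]
    cases h2 : e.2 with
    | none => simp [hadd]
    | some kt =>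
      rw [PySem.Dict.keys_modify, PySem.Dict.keys_insert_of_contains d _ hc, hadd]
  · have hc' : d.contains e.1 = false := by simpa using hc
    have hmem : e.1 ∉ d.keys := fun h =>
      by simp [(PySem.Dict.contains_iff_mem_keys d e.1).mpr h] at hc'
    rw [PySem.Dict.setdefault_of_not_contains d _ hc']
    have hadd : PySem.Set.add d.keys e.1 = d.keys ++ [e.1] := by
      simp [PySem.Set.add, PySem.Set.contains, hmem]
    cases h2 : e.2 with
    | none => simp [PySem.Dict.keys_insert_of_not_contains d _ hc', hadd]
    | some kt =>
      rw [PySem.Dict.keys_modify, PySem.Dict.insert_insert_self,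
        PySem.Dict.keys_insert_of_not_contains d _ hc', hadd]

theorem pvKeys_foldE (es : List (String × Option (String × String)))
    (d : PySem.Dict String (PySem.Dict String String)) :
    (es.foldl pvStepE d).keys = PySem.Set.update d.keys (es.map (fun e => e.1)) := by
  induction es generalizing d with
  | nil => rfl
  | cons e es ih =>
    rw [List.foldl_cons, ih, pvKeys_stepE]
    simp only [List.map_cons]
    rfl

theorem pvGetD_setdefault (d : PySem.Dict String (PySem.Dict String String)) (c c' : String) :
    (d.setdefault c PySem.Dict.empty).getD c' PySem.Dict.empty = d.getD c' PySem.Dict.empty := by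
  by_cases hc : d.contains c = true
  · rw [PySem.Dict.setdefault_of_contains d _ hc]
  · have hc' : d.contains c = false := by simpa using hc
    rw [PySem.Dict.setdefault_of_not_contains d _ hc', PySem.Dict.getD_insert]
    by_cases h : c' = c
    · subst h; rw [if_pos rfl, PySem.Dict.getD_of_not_contains d _ hc']
    · rw [if_neg h]

theorem pvGetD_stepE (d : PySem.Dict String (PySem.Dict String String))
    (e : String × Option (String × String)) (c : String) :
    (pvStepE d e).getD c PySem.Dict.empty =
      pvFill (d.getD c PySem.Dict.empty) (pvGrp [e] c) := by
  obtain ⟨c', a⟩ := e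
  unfold pvStepE
  dsimp only
  cases a with
  | none =>
    have hg : pvGrp [(c', (none : Option (String × String)))] c = [] := by
      by_cases h : c' = c <;> simp [pvGrp, h]
    rw [hg]
    exact pvGetD_setdefault d c' c
  | some kt =>
    rw [PySem.Dict.getD_modify]
    by_cases h : c = c'
    · subst h
      rw [if_pos rfl, pvGetD_setdefault]
      have hg : pvGrp [(c, some kt)] c = [kt] := by simp [pvGrp]
      rw [hg]
      rfl
    · rw [if_neg h, pvGetD_setdefault]
      have hg : pvGrp [(c', some kt)] c = [] := by simp [pvGrp, Ne.symm h]
      rw [hg]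
      rfl

theorem pvGetD_foldE (es : List (String × Option (String × String)))
    (d : PySem.Dict String (PySem.Dict String String)) (c : String) :
    (es.foldl pvStepE d).getD c PySem.Dict.empty =
      pvFill (d.getD c PySem.Dict.empty) (pvGrp es c) := by
  induction es generalizing d with
  | nil => rfl
  | cons e es ih =>
    rw [List.foldl_cons, ih, pvGetD_stepE]
    have : pvGrp (e :: es) c = pvGrp [e] c ++ pvGrp es c := by
      cases h : (e.1 == c) <;> cases h2 : e.2 <;>
        simp [pvGrp, h, h2]
    rw [this]
    simp [pvFill, List.foldl_append]

-- ===== VERDICT (by name: the statement is the Claim_ definition above) =====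
theorem get_camera_topics_py_spec : Claim_equal_get_camera_topics_py := by
  intro topics _
  unfold Spec_get_camera_topics_py get_camera_topics_py get_camera_topics_py_alt
  rw [pvFoldA_eq]
  set es := topics.filterMap pvClassify with hes
  set F := es.foldl pvStepE (PySem.Dict.empty : PySem.Dict String (PySem.Dict String String)) with hF
  have hkeys : F.keys = PySem.Set.ofList (es.map (fun e => e.1)) := by
    rw [hF, pvKeys_foldE]; rfl
  have hnd : F.keys.Nodup := by rw [hkeys]; exact PySem.Set.nodup_ofList _
  rw [PySem.Dict.items_eq_map_keys F hnd PySem.Dict.empty, hkeys]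
  rw [PySem.Dict.items_foldl_insert_fresh _ (fun c => c) _ _
    (fun a _ => PySem.Dict.contains_empty a)
    (by simpa using PySem.Set.nodup_ofList (es.map (fun e => e.1)))]
  rw [show (PySem.Dict.empty : PySem.Dict String (List (String × String))).items = [] from rfl]
  simp only [List.map_map, List.nil_append]
  apply List.map_congr_left
  intro c _
  simp only [Function.comp]
  rw [hF, pvGetD_foldE, PySem.Dict.getD_empty, pvStreams_eq]
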